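-- pv_equiv track=rewrite | github.com/sshebli/sqli-emotet-detect.com | Desktop/dissertation-ml-pipeline/templates/ui_helpers.py | render_feature_explanation_html
-- ===== SOURCE A (Python) =====
-- from textwrap import dedent
--
-- def _html(text: str) -> str:
--     return dedent(text).strip()
--
-- def render_feature_explanation_html(explanations: dict) -> str:
--     items = list(explanations.items())
--     num_columns = 3
--     columns = [[] for _ in range(num_columns)]
--
--     for idx, item in enumerate(items):
--         columns[idx % num_columns].append(item)
--
--     def _card(feat, desc):
--         return _html(f"""
--         <div style="
--             background: rgba(248, 245, 252, 0.6);
--             border: 1px solid rgba(138, 112, 184, 0.18);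
--             border-radius: 12px;
--             padding: 0.75rem 1rem;
--             margin-bottom: 10px;
--         ">
--             <div style="
--                 font-size:0.88rem;
--                 font-weight:700;
--                 color:#5A2D91;
--                 margin-bottom:0.2rem;
--             ">{feat}</div>
--             <div style="
--                 font-size:0.88rem;
--                 color:#4D5D66;
--                 line-height:1.35;
--             ">{desc}</div>
--         </div>
--         """)
--
--     column_html = []
--     for col_items in columns:
--         cards_html = "".join(_card(f, d) for f, d in col_items)
--         column_html.append(f'<div style="flex:1;min-width:0;">{cards_html}</div>')
--
--     return _html(f"""
--     <div style="
--         display:flex;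
--         gap:16px;
--         margin-top:0.5rem;
--         align-items:flex-start;
--     ">
--         {''.join(column_html)}
--     </div>
--     """)
-- ===== SOURCE B (Python) =====
-- from textwrap import dedent
--
-- def _html(text: str) -> str:
--     return dedent(text).strip()
--
-- def render_feature_explanation_html(explanations: dict) -> str:
--     items = list(explanations.items())
--
--     def _card(feat, desc):
--         return _html(f"""
--         <div style="
--             background: rgba(248, 245, 252, 0.6);
--             border: 1px solid rgba(138, 112, 184, 0.18);
--             border-radius: 12px;
--             padding: 0.75rem 1rem;
--             margin-bottom: 10px;
--         ">
--             <div style="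
--                 font-size:0.88rem;
--                 font-weight:700;
--                 color:#5A2D91;
--                 margin-bottom:0.2rem;
--             ">{feat}</div>
--             <div style="
--                 font-size:0.88rem;
--                 color:#4D5D66;
--                 line-height:1.35;
--             ">{desc}</div>
--         </div>
--         """)
--
--     # One row-wise pass: consume the items three at a time and append each
--     # rendered card string directly to its column's string accumulator.
--     c0 = c1 = c2 = ""
--     for i in range(0, len(items), 3):
--         row = items[i:i + 3]
--         c0 += _card(*row[0])
--         if len(row) > 1:
--             c1 += _card(*row[1])
--         if len(row) > 2:
--             c2 += _card(*row[2])
--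
--     body = "".join(
--         f'<div style="flex:1;min-width:0;">{col}</div>' for col in (c0, c1, c2)
--     )
--
--     return _html(f"""
--     <div style="
--         display:flex;
--         gap:16px;
--         margin-top:0.5rem;
--         align-items:flex-start;
--     ">
--         {body}
--     </div>
--     """)
-- ===== Notes on version B (the rewrite author's own statement) =====
-- stated objective: alternative
-- what changed: Replaces A's two staged passes (an index/modulo dispatch loop filling three list buckets, then a second loop rendering each bucket into a column) with a single row-wise pass that consumes the items three at a time and appends each rendered card string directly onto one of three string accumulators, so no intermediate column lists exist.
import Mathlib
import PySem

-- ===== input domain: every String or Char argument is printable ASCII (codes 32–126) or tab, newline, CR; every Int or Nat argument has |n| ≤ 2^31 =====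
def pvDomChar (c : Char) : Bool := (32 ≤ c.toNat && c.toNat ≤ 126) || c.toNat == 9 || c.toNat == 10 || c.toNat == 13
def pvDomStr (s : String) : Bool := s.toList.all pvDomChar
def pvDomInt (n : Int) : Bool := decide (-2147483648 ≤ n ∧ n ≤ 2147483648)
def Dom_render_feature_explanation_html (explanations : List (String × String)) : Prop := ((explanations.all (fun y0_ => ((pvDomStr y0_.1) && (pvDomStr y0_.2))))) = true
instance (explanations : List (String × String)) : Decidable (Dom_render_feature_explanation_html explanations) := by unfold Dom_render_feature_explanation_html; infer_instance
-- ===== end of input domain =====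

-- B replaces A's two staged passes (modulo-dispatch bucketing into three lists, then a
-- rendering loop per bucket) with ONE row-wise pass consuming items three at a time and
-- appending each rendered card directly onto three string accumulators; objective: alternative.

-- Shared helpers: both Python versions contain the IDENTICAL `_html` (= textwrap.dedent +
-- strip) and `_card` helper code, so both ports share these transliterations.
-- `pvDedent` is a hand port of CPython textwrap.dedent (exact for any text):
--   1. whitespace-only lines ([ \t]+) are blanked; 2. margin = common [ \t]* prefix of the
--   lines that have a non-[ \t\n] char; 3. the margin is removed from each line starting with it.
def pvIsSpTab (c : Char) : Bool := c == ' ' || c == '\t'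

def pvCommonPrefix : List Char → List Char → List Char
  | x :: xs, y :: ys => if x == y then x :: pvCommonPrefix xs ys else []
  | _, _ => []

def pvMarginStep (margin : Option (List Char)) (indent : List Char) : Option (List Char) :=
  match margin with
  | none => some indent
  | some m =>
      if m.isPrefixOf indent then some m
      else if indent.isPrefixOf m then some indent
      else some (pvCommonPrefix m indent)

def pvDedent (text : List Char) : List Char :=
  let lines := text.splitOn '\n'
  let lines := lines.map (fun l => if l ≠ [] ∧ l.all pvIsSpTab then [] else l)
  let indents := (lines.filter (fun l => l.dropWhile pvIsSpTab ≠ [])).map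
    (fun l => l.takeWhile pvIsSpTab)
  let margin := indents.foldl pvMarginStep none
  let lines :=
    match margin with
    | none => lines
    | some m =>
        if m = [] then lines
        else lines.map (fun l => if m.isPrefixOf l then l.drop m.length else l)
  List.intercalate ['\n'] lines

-- _html(text) = dedent(text).strip()
def pvHtml (text : String) : String := PySem.Str.strip (String.ofList (pvDedent text.toList))

-- The literal template pieces of the f-strings in `_card` and the outer wrapper
def pvCardP1 : String := "\n        <div style=\"\n            background: rgba(248, 245, 252, 0.6);\n            border: 1px solid rgba(138, 112, 184, 0.18);\n            border-radius: 12px;\n            padding: 0.75rem 1rem;\n            margin-bottom: 10px;\n        \">\n            <div style=\"\n                font-size:0.88rem;\n                font-weight:700;\n                color:#5A2D91;\n                margin-bottom:0.2rem;\n            \">"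
def pvCardP2 : String := "</div>\n            <div style=\"\n                font-size:0.88rem;\n                color:#4D5D66;\n                line-height:1.35;\n            \">"
def pvCardP3 : String := "</div>\n        </div>\n        "
def pvOuterQ1 : String := "\n    <div style=\"\n        display:flex;\n        gap:16px;\n        margin-top:0.5rem;\n        align-items:flex-start;\n    \">\n        "
def pvOuterQ2 : String := "\n    </div>\n    "

-- _card(feat, desc)
def pvCard (feat desc : String) : String :=
  pvHtml (pvCardP1 ++ feat ++ pvCardP2 ++ desc ++ pvCardP3)

-- ===== PORT A =====
-- the loop `for idx, item in enumerate(items): columns[idx % 3].append(item)`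
def pvBucket : List (String × String) → Nat →
    (List (String × String) × List (String × String) × List (String × String)) →
    (List (String × String) × List (String × String) × List (String × String))
  | [], _, acc => acc
  | x :: xs, idx, (c0, c1, c2) =>
      pvBucket xs (idx + 1)
        (if idx % 3 = 0 then (c0 ++ [x], c1, c2)
         else if idx % 3 = 1 then (c0, c1 ++ [x], c2)
         else (c0, c1, c2 ++ [x]))

-- one column div: '<div style="flex:1;min-width:0;">' + "".join(_card(f,d) …) + '</div>'
def pvColumn (col : List (String × String)) : String :=
  "<div style=\"flex:1;min-width:0;\">" ++
    PySem.Str.join "" (col.map (fun p => pvCard p.1 p.2)) ++ "</div>"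

def render_feature_explanation_html (explanations : List (String × String)) : String :=
  let items := explanations
  match pvBucket items 0 ([], [], []) with
  | (c0, c1, c2) =>
    let column_html := [pvColumn c0, pvColumn c1, pvColumn c2]
    pvHtml (pvOuterQ1 ++ PySem.Str.join "" column_html ++ pvOuterQ2)

-- ===== PORT B =====
-- the chunked `for i in range(0, len(items), 3)` loop: up to three items per round, appending each rendered card
-- string directly onto its column's string accumulator
def pvFill : List (String × String) → String → String → String → String × String × String
  | [], c0, c1, c2 => (c0, c1, c2)
  | [x], c0, c1, c2 => (c0 ++ pvCard x.1 x.2, c1, c2)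
  | [x, y], c0, c1, c2 => (c0 ++ pvCard x.1 x.2, c1 ++ pvCard y.1 y.2, c2)
  | x :: y :: z :: rest, c0, c1, c2 =>
      pvFill rest (c0 ++ pvCard x.1 x.2) (c1 ++ pvCard y.1 y.2) (c2 ++ pvCard z.1 z.2)

def pvColWrap (col : String) : String :=
  "<div style=\"flex:1;min-width:0;\">" ++ col ++ "</div>"

def render_feature_explanation_html_alt (explanations : List (String × String)) : String :=
  let items := explanations
  match pvFill items "" "" "" with
  | (c0, c1, c2) =>
    let body := PySem.Str.join "" [pvColWrap c0, pvColWrap c1, pvColWrap c2]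
    pvHtml (pvOuterQ1 ++ body ++ pvOuterQ2)

-- ===== PRECONDITION & SPEC =====
def Spec_render_feature_explanation_html (explanations : List (String × String)) (out : String) : Prop := out = render_feature_explanation_html_alt explanations
instance (explanations : List (String × String)) (out : String) : Decidable (Spec_render_feature_explanation_html explanations out) := by unfold Spec_render_feature_explanation_html; infer_instance

-- ===== CLAIM (what is proved, stated in full; the proofs are below) =====
def Claim_equal_render_feature_explanation_html : Prop := ∀ (explanations : List (String × String)), Dom_render_feature_explanation_html explanations → Spec_render_feature_explanation_html explanations (render_feature_explanation_html explanations)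

-- ===== LEMMAS AND PROOFS =====
-- the stride slice items[c::3] (for 0 ≤ c < 3 applied after `drop c`), used only in proofs
def pvStride3 : List (String × String) → List (String × String)
  | [] => []
  | x :: xs => x :: pvStride3 (xs.drop 2)
termination_by l => l.length
decreasing_by simp

-- concatenation of the rendered cards of a list of items
def pvCards (col : List (String × String)) : String :=
  PySem.Str.join "" (col.map (fun p => pvCard p.1 p.2))

theorem pvStride3_nil : pvStride3 [] = [] := by rw [pvStride3]

theorem pvStride3_cons (x : String × String) (xs : List (String × String)) :
    pvStride3 (x :: xs) = x :: pvStride3 (xs.drop 2) := by rw [pvStride3]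

-- The bucketing loop started at phase idx % 3 produces the three stride slices, rotated by
-- the phase and appended to the accumulators.
theorem pvBucket_eq (l : List (String × String)) : ∀ (i : Nat) c0 c1 c2,
    pvBucket l i (c0, c1, c2) =
      if i % 3 = 0 then
        (c0 ++ pvStride3 l, c1 ++ pvStride3 (l.drop 1), c2 ++ pvStride3 (l.drop 2))
      else if i % 3 = 1 then
        (c0 ++ pvStride3 (l.drop 2), c1 ++ pvStride3 l, c2 ++ pvStride3 (l.drop 1))
      else
        (c0 ++ pvStride3 (l.drop 1), c1 ++ pvStride3 (l.drop 2), c2 ++ pvStride3 l) := by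
  induction l with
  | nil => intro i c0 c1 c2; simp [pvBucket, pvStride3_nil]
  | cons x xs ih =>
      intro i c0 c1 c2
      have h3 : i % 3 = 0 ∨ i % 3 = 1 ∨ i % 3 = 2 := by omega
      rcases h3 with h | h | h
      · have h' : (i + 1) % 3 = 1 := by omega
        simp [pvBucket, h, ih (i + 1), h', pvStride3_cons]
      · have h' : (i + 1) % 3 = 2 := by omega
        simp [pvBucket, h, ih (i + 1), h', pvStride3_cons]
      · have h' : (i + 1) % 3 = 0 := by omega
        simp [pvBucket, h, ih (i + 1), h', pvStride3_cons]

theorem pvBucket_main (l : List (String × String)) :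
    pvBucket l 0 ([], [], []) = (pvStride3 l, pvStride3 (l.drop 1), pvStride3 (l.drop 2)) := by
  simpa using pvBucket_eq l 0 [] [] []

theorem pvCards_nil : pvCards [] = "" := by
  simp [pvCards, PySem.Str.join]

theorem pvIntercalateNil {α : Type} (a : List α) (l : List (List α)) :
    List.intercalate [] (a :: l) = a ++ List.intercalate [] l := by
  cases l with
  | nil => simp [List.intercalate]
  | cons b l => simp [List.intercalate, List.intersperse]

theorem pvCards_cons (x : String × String) (xs : List (String × String)) :
    pvCards (x :: xs) = pvCard x.1 x.2 ++ pvCards xs := by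
  simp [pvCards, PySem.Str.join, PySem.Chars.join, pvIntercalateNil, String.ofList]
  rfl

-- The row-wise fill loop produces the concatenated cards of the three stride slices.
theorem pvFill_eq (l : List (String × String)) (c0 c1 c2 : String) :
    pvFill l c0 c1 c2 =
      (c0 ++ pvCards (pvStride3 l),
       c1 ++ pvCards (pvStride3 (l.drop 1)),
       c2 ++ pvCards (pvStride3 (l.drop 2))) := by
  fun_induction pvFill l c0 c1 c2 with
  | case1 c0 c1 c2 => simp [pvStride3_nil, pvCards_nil]
  | case2 x c0 c1 c2 =>
      simp [pvStride3_cons, pvStride3_nil, pvCards_cons, pvCards_nil]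
  | case3 x y c0 c1 c2 =>
      simp [pvStride3_cons, pvStride3_nil, pvCards_cons, pvCards_nil]
  | case4 x y z rest c0 c1 c2 ih =>
      rw [ih]
      simp [pvStride3_cons, pvCards_cons, String.append_assoc]

theorem pvColumn_eq (col : List (String × String)) :
    pvColumn col = pvColWrap (pvCards col) := rfl

-- ===== VERDICT (by name: the statement is the Claim_ definition above) =====
theorem render_feature_explanation_html_spec : Claim_equal_render_feature_explanation_html := by
  intro explanations _
  unfold Spec_render_feature_explanation_html
  unfold render_feature_explanation_html render_feature_explanation_html_alt
  simp [pvBucket_main, pvFill_eq, pvColumn_eq]
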